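-- pv_equiv track=rewrite | github.com/bruno-g-galvan/Facu | EXTRAS/3.4.225 - INTRODUCCIÓN A LA ALGORITMIA/Guias practicas resueltas/Ejercitacion Listas/ejercicio11_listas.py | concatenarImparesyReverso
-- ===== SOURCE A (Python) =====
-- def concatenarImparesyReverso(listaUno,listaDos):
--     lista=[]
--     for i in range(len(listaUno)):
--         if listaUno[i]%2!=0:
--             lista.append(listaUno[i])
--     pares=[]
--     for i in range(len(listaDos)):
--         if listaDos[i]%2==0:
--             pares.append(listaDos[i])
--     for num in pares:
--         numero_invertido = 0
--         while num > 0: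
--             ultimo_digito = num % 10
--             numero_invertido = numero_invertido * 10 + ultimo_digito
--             num //= 10
--         lista.append(numero_invertido)
--     return lista
-- ===== SOURCE B (Python) =====
-- def concatenarImparesyReverso(listaUno, listaDos):
--     def ndigits(n):
--         return 0 if n <= 0 else 1 + ndigits(n // 10)
--
--     def rev(n):
--         # place-value recursion: the last digit of n becomes the leading
--         # digit of the reversal, weighted by 10**(ndigits(n)-1)
--         return 0 if n <= 0 else rev(n // 10) + (n % 10) * 10 ** (ndigits(n) - 1)
--
--     return [x for x in listaUno if x % 2 != 0] + [rev(n) for n in listaDos if n % 2 == 0]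
-- ===== Notes on version B (the rewrite author's own statement) =====
-- stated objective: simpler
-- what changed: Replaces A's three index/while loops (append-filters plus an accumulator while-loop reversing digits) with two comprehensions and a pure place-value recursion that weights each digit by its mirrored power of ten, no accumulator state.
import Mathlib
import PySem

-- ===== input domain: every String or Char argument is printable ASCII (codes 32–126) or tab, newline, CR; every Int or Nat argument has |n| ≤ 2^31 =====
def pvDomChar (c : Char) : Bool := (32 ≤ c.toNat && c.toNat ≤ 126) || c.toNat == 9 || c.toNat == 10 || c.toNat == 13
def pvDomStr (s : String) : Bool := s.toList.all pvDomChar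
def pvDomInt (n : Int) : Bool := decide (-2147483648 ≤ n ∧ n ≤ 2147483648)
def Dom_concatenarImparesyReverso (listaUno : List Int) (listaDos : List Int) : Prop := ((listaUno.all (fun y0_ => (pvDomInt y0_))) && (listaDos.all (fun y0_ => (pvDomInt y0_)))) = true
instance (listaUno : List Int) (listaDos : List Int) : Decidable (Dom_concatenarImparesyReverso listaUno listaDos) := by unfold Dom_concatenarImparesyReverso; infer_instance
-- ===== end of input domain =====

-- B replaces A's index/while loops with comprehensions and a pure place-value
-- recursion for the digit reversal (objective: simpler).

-- ===== PORT A =====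
-- the 'while num > 0' loop of A, with its two mutable variables as arguments
theorem pvFloordiv10_lt (n : Int) (h : 0 < n) : (PySem.Int.floordiv n 10).toNat < n.toNat := by
  have h1 : PySem.Int.floordiv n 10 < n :=
    (PySem.Int.floordiv_lt_iff_lt_mul (by norm_num)).mpr (by omega)
  have h2 : 0 ≤ PySem.Int.floordiv n 10 :=
    (PySem.Int.le_floordiv_iff_mul_le (by norm_num)).mpr (by omega)
  omega

def pvRevLoop (numero_invertido : Int) (num : Int) : Int :=
  if h : 0 < num then
    pvRevLoop (numero_invertido * 10 + PySem.Int.mod num 10) (PySem.Int.floordiv num 10)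
  else numero_invertido
termination_by num.toNat
decreasing_by exact pvFloordiv10_lt num h

def concatenarImparesyReverso (listaUno : List Int) (listaDos : List Int) : List Int :=
  let lista := (PySem.List.pyRange 0 (PySem.List.len listaUno) 1).foldl
    (fun acc i => if PySem.Int.mod (PySem.List.pyGetD listaUno i 0) 2 ≠ 0
                  then acc ++ [PySem.List.pyGetD listaUno i 0] else acc) []
  let pares := (PySem.List.pyRange 0 (PySem.List.len listaDos) 1).foldl
    (fun acc i => if PySem.Int.mod (PySem.List.pyGetD listaDos i 0) 2 = 0
                  then acc ++ [PySem.List.pyGetD listaDos i 0] else acc) []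
  pares.foldl (fun acc num => acc ++ [pvRevLoop 0 num]) lista

-- ===== PORT B =====
def pvNdigits (n : Int) : Int :=
  if h : n ≤ 0 then 0 else 1 + pvNdigits (PySem.Int.floordiv n 10)
termination_by n.toNat
decreasing_by exact pvFloordiv10_lt n (by omega)

def pvRev (n : Int) : Int :=
  if h : n ≤ 0 then 0
  else pvRev (PySem.Int.floordiv n 10) + PySem.Int.mod n 10 * 10 ^ (pvNdigits n - 1).toNat
termination_by n.toNat
decreasing_by exact pvFloordiv10_lt n (by omega)

def concatenarImparesyReverso_alt (listaUno : List Int) (listaDos : List Int) : List Int :=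
  (listaUno.filter (fun x => decide (PySem.Int.mod x 2 ≠ 0)))
    ++ (listaDos.filter (fun x => decide (PySem.Int.mod x 2 = 0))).map pvRev

-- ===== PRECONDITION & SPEC =====
def Spec_concatenarImparesyReverso (listaUno : List Int) (listaDos : List Int) (out : List Int) : Prop := out = concatenarImparesyReverso_alt listaUno listaDos
instance (listaUno : List Int) (listaDos : List Int) (out : List Int) : Decidable (Spec_concatenarImparesyReverso listaUno listaDos out) := by unfold Spec_concatenarImparesyReverso; infer_instance

-- ===== CLAIM (what is proved, stated in full; the proofs are below) =====
def Claim_equal_concatenarImparesyReverso : Prop := ∀ (listaUno : List Int) (listaDos : List Int), Dom_concatenarImparesyReverso listaUno listaDos → Spec_concatenarImparesyReverso listaUno listaDos (concatenarImparesyReverso listaUno listaDos)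

-- ===== LEMMAS AND PROOFS =====
theorem pvNdigits_nonneg (n : Int) : 0 ≤ pvNdigits n := by
  unfold pvNdigits
  split
  · omega
  · have := pvNdigits_nonneg (PySem.Int.floordiv n 10)
    omega
termination_by n.toNat
decreasing_by exact pvFloordiv10_lt n (by omega)

theorem pvRevLoop_eq (acc n : Int) :
    pvRevLoop acc n = acc * 10 ^ (pvNdigits n).toNat + pvRev n := by
  by_cases h : 0 < n
  · rw [pvRevLoop]
    simp only [h, dite_true]
    rw [pvRevLoop_eq (acc * 10 + PySem.Int.mod n 10) (PySem.Int.floordiv n 10)]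
    conv_rhs => rw [pvRev]
    simp only [show ¬ n ≤ 0 by omega, dite_false]
    have hd := pvNdigits_nonneg (PySem.Int.floordiv n 10)
    have hn : pvNdigits n = 1 + pvNdigits (PySem.Int.floordiv n 10) := by
      rw [pvNdigits]; simp [show ¬ n ≤ 0 by omega]
    rw [hn]
    have h1 : (1 + pvNdigits (PySem.Int.floordiv n 10)).toNat
        = (pvNdigits (PySem.Int.floordiv n 10)).toNat + 1 := by omega
    have h2 : (1 + pvNdigits (PySem.Int.floordiv n 10) - 1).toNat
        = (pvNdigits (PySem.Int.floordiv n 10)).toNat := by omega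
    rw [h1, h2]
    ring
  · rw [pvRevLoop, pvNdigits, pvRev]
    simp only [h, dite_false, show n ≤ 0 by omega, dite_true]
    simp
termination_by n.toNat
decreasing_by exact pvFloordiv10_lt n h

-- ===== VERDICT (by name: the statement is the Claim_ definition above) =====
theorem concatenarImparesyReverso_spec : Claim_equal_concatenarImparesyReverso := by
  intro l1 l2 _
  unfold Spec_concatenarImparesyReverso concatenarImparesyReverso concatenarImparesyReverso_alt
  dsimp only
  rw [PySem.List.foldl_pyRange_pyGetD l1 0
        (fun acc x => if PySem.Int.mod x 2 ≠ 0 then acc ++ [x] else acc) [] (by omega),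
      PySem.List.foldl_pyRange_pyGetD l2 0
        (fun acc x => if PySem.Int.mod x 2 = 0 then acc ++ [x] else acc) [] (by omega)]
  simp only [Int.toNat_zero, List.drop_zero]
  rw [PySem.List.foldl_append_ite_eq_filter, PySem.List.foldl_append_ite_eq_filter,
      PySem.List.foldl_append_singleton_eq_map]
  simp [funext fun n => pvRevLoop_eq 0 n]
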